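-- pv_equiv track=rewrite | github.com/jmpmonge/TFM | controllers/pioneer_TFM/planificacion/algoritmos.py | aplanar_mision
-- ===== SOURCE A (Python) =====
-- def aplanar_mision(rutas):
--     """Une los tramos devueltos por `planificar_mision` en un único camino.
--
--     Si algún tramo está vacío (no se encontró ruta), devuelve [] para señalar
--     que la misión completa es inválida.
--     """
--     camino = []
--     for i, ruta in enumerate(rutas):
--         if not ruta:
--             return []
--         if i == 0:
--             camino.extend(ruta)
--         else:
--             camino.extend(ruta[1:])
--     return camino
-- ===== SOURCE B (Python) =====
-- def aplanar_mision(rutas):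
--     """Une los tramos en un unico camino; [] si no hay tramos o alguno es vacio.
--
--     Recursivo de derecha a izquierda: ensamblar construye la cola (tramos
--     posteriores sin su primer punto) de atras hacia adelante, usando None como
--     señal de tramo vacio; al final se antepone el primer tramo completo.
--     """
--     def ensamblar(rs):
--         if not rs:
--             return []
--         resto = ensamblar(rs[1:])
--         if resto is None or not rs[0]:
--             return None
--         return rs[0][1:] + resto
--
--     if not rutas:
--         return []
--     cola = ensamblar(rutas[1:])
--     if cola is None or not rutas[0]:
--         return []
--     return rutas[0] + cola
-- ===== Notes on version B (the rewrite author's own statement) =====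
-- stated objective: alternative
-- what changed: A builds the path front-to-back in one indexed loop with an accumulator and a mid-build early return; B is recursive and builds back-to-front: a structural recursion ensamblar assembles the suffix of dropped-joint tails right-to-left, signalling an empty segment with None, and the first segment is prepended whole at the end.
import Mathlib
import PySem

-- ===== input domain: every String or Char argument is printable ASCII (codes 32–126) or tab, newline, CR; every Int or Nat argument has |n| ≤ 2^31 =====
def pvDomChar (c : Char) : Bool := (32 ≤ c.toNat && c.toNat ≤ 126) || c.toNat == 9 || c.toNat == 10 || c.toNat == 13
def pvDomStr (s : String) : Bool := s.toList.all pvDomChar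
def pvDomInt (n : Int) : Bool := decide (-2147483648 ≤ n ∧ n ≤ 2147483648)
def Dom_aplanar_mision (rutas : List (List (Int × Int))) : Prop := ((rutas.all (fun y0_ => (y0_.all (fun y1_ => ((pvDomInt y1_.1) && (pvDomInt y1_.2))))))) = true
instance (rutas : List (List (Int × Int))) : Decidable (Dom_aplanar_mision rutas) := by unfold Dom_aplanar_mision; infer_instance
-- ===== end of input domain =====

-- B replaces A's indexed accumulator loop by a right-to-left structural recursion with an Option
-- failure signal, prepending the first segment at the end; same value, different decomposition.

-- ===== PORT A =====
-- A's fused loop: index i, accumulator camino, early return [] on an empty segment.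
def aplanarGoA : List (List (Int × Int)) → Nat → List (Int × Int) → List (Int × Int)
  | [], _, camino => camino
  | ruta :: rs, i, camino =>
    if ruta = [] then []
    else if i = 0 then aplanarGoA rs (i + 1) (camino ++ ruta)
    else aplanarGoA rs (i + 1) (camino ++ ruta.drop 1)   -- ruta[1:] on a list = drop 1 (exact)

def aplanar_mision (rutas : List (List (Int × Int))) : List (Int × Int) :=
  aplanarGoA rutas 0 []

-- ===== PORT B =====
-- ensamblar: right-to-left recursion; none = an empty segment was seen (Python's None).
def ensamblarB : List (List (Int × Int)) → Option (List (Int × Int))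
  | [] => some []
  | r :: rs =>
    match ensamblarB rs with
    | none => none
    | some resto => if r = [] then none else some (r.drop 1 ++ resto)   -- rs[0][1:] = drop 1 (exact)

def aplanar_mision_alt (rutas : List (List (Int × Int))) : List (Int × Int) :=
  match rutas with
  | [] => []
  | head :: rest =>
    match ensamblarB rest with
    | none => []
    | some cola => if head = [] then [] else head ++ cola

-- ===== PRECONDITION & SPEC =====
def Spec_aplanar_mision (rutas : List (List (Int × Int))) (out : List (Int × Int)) : Prop := out = aplanar_mision_alt rutas
instance (rutas : List (List (Int × Int))) (out : List (Int × Int)) : Decidable (Spec_aplanar_mision rutas out) := by unfold Spec_aplanar_mision; infer_instance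

-- ===== CLAIM (what is proved, stated in full; the proofs are below) =====
def Claim_equal_aplanar_mision : Prop := ∀ (rutas : List (List (Int × Int))), Dom_aplanar_mision rutas → Spec_aplanar_mision rutas (aplanar_mision rutas)

-- ===== LEMMAS AND PROOFS =====
-- B's recursion in closed form: none iff some segment is empty, else the flattened tails.
theorem ensamblarB_eq (rs : List (List (Int × Int))) :
    ensamblarB rs =
      if rs.any (fun r => r.isEmpty) then none
      else some ((rs.map (fun r => r.drop 1)).flatten) := by
  induction rs with
  | nil => simp [ensamblarB]
  | cons r rs ih =>
    by_cases hr : r = []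
    · simp [ensamblarB, ih, hr]
      split_ifs <;> simp
    · have : ¬ r.isEmpty := by simpa [List.isEmpty_iff] using hr
      simp [ensamblarB, ih, this]
      split_ifs <;> simp

-- A's loop after the first segment, in the same closed form.
theorem aplanarGoA_pos (rs : List (List (Int × Int))) :
    ∀ (i : Nat) (camino : List (Int × Int)), i ≠ 0 →
    aplanarGoA rs i camino =
      if rs.any (fun r => r.isEmpty) then []
      else camino ++ (rs.map (fun r => r.drop 1)).flatten := by
  induction rs with
  | nil => intro i camino _; simp [aplanarGoA]
  | cons r rs ih =>
    intro i camino hi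
    by_cases hr : r = []
    · simp [aplanarGoA, hr]
    · have : ¬ r.isEmpty := by simpa [List.isEmpty_iff] using hr
      rw [aplanarGoA]
      simp only [hr, if_false, hi, ih (i + 1) (camino ++ r.drop 1) (by omega)]
      simp [this, List.append_assoc]

-- ===== VERDICT (by name: the statement is the Claim_ definition above) =====
theorem aplanar_mision_spec : Claim_equal_aplanar_mision := by
  intro rutas _
  unfold Spec_aplanar_mision aplanar_mision aplanar_mision_alt
  cases rutas with
  | nil => simp [aplanarGoA]
  | cons head rest =>
    dsimp only
    rw [ensamblarB_eq]
    by_cases hh : head = []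
    · simp [aplanarGoA, hh]
      split_ifs <;> simp
    · simp [aplanarGoA, hh, aplanarGoA_pos rest 1 head (by omega)]
      split_ifs <;> simp
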